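-- pv_equiv track=rewrite | github.com/spranavi-arch/document-generator | formatting/utils/formatter.py | _split_into_document_segments
-- ===== SOURCE A (Python) =====
-- NEW_DOCUMENT_START_PHRASES = (
--     "supreme court of the state of new york",
--     "supreme court of new york",
-- )
--
-- def _split_into_document_segments(blocks: list) -> list[list]:
--     """Split blocks into one list per document. New document starts at repeated court heading (not at index 0)."""
--     if not blocks:
--         return []
--     segment_starts = [0]
--     for i in range(1, len(blocks)):
--         bt, text = blocks[i]
--         t = (text or "").strip().lower()
--         if not t:
--             continue
--         for phrase in NEW_DOCUMENT_START_PHRASES: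
--             if t.startswith(phrase) or t == phrase.strip() or phrase in t[:80]:
--                 segment_starts.append(i)
--                 break
--     out = []
--     for j in range(len(segment_starts)):
--         start = segment_starts[j]
--         end = segment_starts[j + 1] if j + 1 < len(segment_starts) else len(blocks)
--         out.append(blocks[start:end])
--     return out
-- ===== SOURCE B (Python) =====
-- NEW_DOCUMENT_START_PHRASES = (
--     "supreme court of the state of new york",
--     "supreme court of new york",
-- )
--
-- def _split_into_document_segments(blocks: list) -> list[list]:
--     """One pass: start a fresh segment at each court-heading block (never at index 0)."""
--     if not blocks:
--         return []
--     out = [[blocks[0]]]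
--     for blk in blocks[1:]:
--         bt, text = blk
--         t = (text or "").strip().lower()
--         if t and any(t.startswith(p) or t == p.strip() or p in t[:80]
--                      for p in NEW_DOCUMENT_START_PHRASES):
--             out.append([blk])
--         else:
--             out[-1].append(blk)
--     return out
-- ===== Notes on version B (the rewrite author's own statement) =====
-- stated objective: simpler
-- what changed: Replaced the two-phase index-table-then-slice algorithm (collect segment_starts, then slice blocks between consecutive starts) with a single pass that builds the segments directly, appending each block to the current segment or opening a new one at a heading.
import Mathlib
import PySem

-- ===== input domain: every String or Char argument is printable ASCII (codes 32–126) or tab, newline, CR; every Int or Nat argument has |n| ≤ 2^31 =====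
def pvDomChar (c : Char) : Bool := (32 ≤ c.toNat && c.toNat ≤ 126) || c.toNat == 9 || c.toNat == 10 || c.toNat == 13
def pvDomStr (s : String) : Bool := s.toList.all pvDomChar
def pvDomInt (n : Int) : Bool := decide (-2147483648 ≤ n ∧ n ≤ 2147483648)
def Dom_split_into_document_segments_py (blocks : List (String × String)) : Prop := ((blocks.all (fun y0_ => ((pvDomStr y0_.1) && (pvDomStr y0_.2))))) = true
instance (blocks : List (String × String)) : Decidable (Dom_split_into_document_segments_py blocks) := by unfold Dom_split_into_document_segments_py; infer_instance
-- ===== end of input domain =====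

-- B is a simpler one-pass construction of the segments; A builds a start-index table and slices.

def pvPhrases : List String :=
  ["supreme court of the state of new york", "supreme court of new york"]

-- the three-part phrase test shared verbatim by both Pythons
def pvMatch (t p : String) : Bool :=
  PySem.Str.startswith t p || (t == PySem.Str.strip p) ||
    PySem.Str.isIn p (PySem.Str.slice t none (some 80))

-- ===== PORT A =====
-- inner 'for phrase in …: if …: append; break' of A, as first-match scan
def aScanPhrases (t : String) : List String → Bool
  | [] => false
  | p :: ps => if pvMatch t p then true else aScanPhrases t ps

def split_into_document_segments_py (blocks : List (String × String)) : List (List (String × String)) :=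
  if blocks = [] then []
  else
    let n : Int := blocks.length
    -- 'blocks[i]' is always in range here; pyGetD's default is never used
    let starts : List Int :=
      (PySem.List.pyRange 1 n 1).foldl
        (fun acc i =>
          let blk := PySem.List.pyGetD blocks i ("", "")
          let t := PySem.Str.lower (PySem.Str.strip blk.2)  -- (text or "") is text for str
          if t == "" then acc
          else if aScanPhrases t pvPhrases then acc ++ [i] else acc)
        [(0 : Int)]
    (PySem.List.pyRange 0 (starts.length : Int) 1).foldl
      (fun out j =>
        let start := PySem.List.pyGetD starts j 0
        let e : Int :=
          if j + 1 < (starts.length : Int) then PySem.List.pyGetD starts (j + 1) 0 else n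
        out ++ [PySem.List.slice blocks (some start) (some e)])
      []

-- ===== PORT B =====
def bBoundary (blk : String × String) : Bool :=
  let t := PySem.Str.lower (PySem.Str.strip blk.2)
  t != "" && pvPhrases.any (fun p => pvMatch t p)

def split_into_document_segments_py_alt (blocks : List (String × String)) : List (List (String × String)) :=
  match blocks with
  | [] => []
  | b :: rest =>
    -- state = (finished segments, current segment); 'out[-1].append' / 'out.append([blk])'
    let st := rest.foldl
      (fun (st : List (List (String × String)) × List (String × String)) blk =>
        if bBoundary blk then (st.1 ++ [st.2], [blk]) else (st.1, st.2 ++ [blk]))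
      ([], [b])
    st.1 ++ [st.2]

-- ===== PRECONDITION & SPEC =====
def Spec_split_into_document_segments_py (blocks : List (String × String)) (out : List (List (String × String))) : Prop := out = split_into_document_segments_py_alt blocks
instance (blocks : List (String × String)) (out : List (List (String × String))) : Decidable (Spec_split_into_document_segments_py blocks out) := by unfold Spec_split_into_document_segments_py; infer_instance

-- ===== CLAIM (what is proved, stated in full; the proofs are below) =====
def Claim_equal_split_into_document_segments_py : Prop := ∀ (blocks : List (String × String)), Dom_split_into_document_segments_py blocks → Spec_split_into_document_segments_py blocks (split_into_document_segments_py blocks)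

-- ===== LEMMAS AND PROOFS =====

-- B's recursion, as a function: current segment + remaining blocks
def pvGl (cur : List (String × String)) : List (String × String) → List (List (String × String))
  | [] => [cur]
  | r :: rs => if bBoundary r then cur :: pvGl [r] rs else pvGl (cur ++ [r]) rs

-- boundary indices into rest (0-based), Nat level
def pvI (rest : List (String × String)) : List Nat :=
  (List.range rest.length).filter (fun k => bBoundary (rest.getD k ("", "")))

-- A's slice table, structural form over Int start indices
def pvZS (n : Int) (xs : List (String × String)) : List Int → List (List (String × String))
  | [] => []
  | [s] => [PySem.List.slice xs (some s) (some n)]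
  | s :: s' :: ss => PySem.List.slice xs (some s) (some s') :: pvZS n xs (s' :: ss)

-- Nat-level chopping at absolute positions
def pvChop (n : Nat) (xs : List (String × String)) : List Nat → List (List (String × String))
  | [] => []
  | [s] => [(xs.drop s).take (n - s)]
  | s :: s' :: ss => (xs.drop s).take (s' - s) :: pvChop n xs (s' :: ss)

theorem aScanPhrases_eq_any (t : String) (ps : List String) :
    aScanPhrases t ps = ps.any (fun p => pvMatch t p) := by
  induction ps with
  | nil => rfl
  | cons p ps ih => by_cases h : pvMatch t p <;> simp [aScanPhrases, List.any_cons, h, ih]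

theorem pvGl_append (x y : List (String × String)) (rest : List (String × String)) :
    pvGl (x ++ y) rest =
      match pvGl y rest with
      | [] => []
      | h :: t => (x ++ h) :: t := by
  induction rest generalizing y with
  | nil => simp [pvGl]
  | cons r rs ih =>
    simp only [pvGl]
    by_cases h : bBoundary r
    · simp [h]
    · simp only [h, Bool.false_eq_true, ite_false]
      rw [List.append_assoc] at *
      exact ih (y ++ [r])

theorem fold_eq_pvGl (rest : List (String × String)) (segs : List (List (String × String)))
    (cur : List (String × String)) :
    (rest.foldl
      (fun (st : List (List (String × String)) × List (String × String)) blk =>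
        if bBoundary blk then (st.1 ++ [st.2], [blk]) else (st.1, st.2 ++ [blk]))
      (segs, cur)).1 ++
    [(rest.foldl
      (fun (st : List (List (String × String)) × List (String × String)) blk =>
        if bBoundary blk then (st.1 ++ [st.2], [blk]) else (st.1, st.2 ++ [blk]))
      (segs, cur)).2] = segs ++ pvGl cur rest := by
  induction rest generalizing segs cur with
  | nil => simp [pvGl]
  | cons r rs ih =>
    simp only [List.foldl_cons, pvGl]
    by_cases h : bBoundary r
    · simp only [h, ite_true]; rw [ih]; simp
    · simp only [h, Bool.false_eq_true, ite_false]; rw [ih]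

theorem pvI_cons (r : String × String) (rs : List (String × String)) :
    pvI (r :: rs) = (if bBoundary r then [0] else []) ++ (pvI rs).map (· + 1) := by
  unfold pvI
  rw [List.length_cons, List.range_succ_eq_map, List.filter_cons, List.filter_map]
  by_cases h : bBoundary r <;> simp [h, Function.comp_def]

-- shift: chopping x::xs at positions +1 = chopping xs
theorem pvChop_shift (m : Nat) (x : String × String) (xs : List (String × String))
    (ss : List Nat) :
    pvChop (m + 1) (x :: xs) (ss.map (· + 1)) = pvChop m xs ss := by
  induction ss with
  | nil => rfl
  | cons s ss ih =>
    cases ss with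
    | nil => simp [pvChop]
    | cons s' ss' =>
      simp only [List.map_cons, pvChop] at *
      congr 1
      simp [Nat.succ_sub_succ]

theorem pvChop_prepend_head (m : Nat) (x : String × String) (xs : List (String × String))
    (ss : List Nat) :
    pvChop (m + 1) (x :: xs) (0 :: ss.map (· + 1)) =
      match pvChop m xs (0 :: ss) with
      | [] => []
      | h :: t => (x :: h) :: t := by
  cases ss with
  | nil => simp [pvChop]
  | cons s ss' =>
    simp only [List.map_cons, pvChop]
    rw [show (s + 1) :: ss'.map (· + 1) = (s :: ss').map (· + 1) from rfl,
      pvChop_shift m x xs (s :: ss')]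
    simp

theorem pvChop_cons₂ (n : Nat) (xs : List (String × String)) (s s' : Nat) (ss : List Nat) :
    pvChop n xs (s :: s' :: ss) = (xs.drop s).take (s' - s) :: pvChop n xs (s' :: ss) := rfl

theorem pvGl_cons (cur : List (String × String)) (r : String × String)
    (rs : List (String × String)) :
    pvGl cur (r :: rs) = if bBoundary r then cur :: pvGl [r] rs else pvGl (cur ++ [r]) rs := rfl

theorem pvChop_eq_pvGl (rest : List (String × String)) (b : String × String) :
    pvChop (rest.length + 1) (b :: rest) (0 :: (pvI rest).map (· + 1)) = pvGl [b] rest := by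
  induction rest generalizing b with
  | nil => simp [pvI, pvChop, pvGl]
  | cons r rs ih =>
    rw [pvI_cons]
    simp only [List.length_cons]
    by_cases h : bBoundary r
    · simp only [h, ite_true, List.singleton_append]
      have hl : ((0 :: (pvI rs).map (· + 1)).map (· + 1))
          = 1 :: ((pvI rs).map (· + 1)).map (· + 1) := by rw [List.map_cons]
      rw [hl, pvChop_cons₂, ← hl,
        pvChop_shift (rs.length + 1) b (r :: rs) (0 :: (pvI rs).map (· + 1)), ih r, pvGl_cons]
      simp [h]
    · simp only [h, Bool.false_eq_true, ite_false, List.nil_append, List.map_map,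
        Function.comp_def]
      rw [show ((pvI rs).map fun x => x + 1 + 1) = ((pvI rs).map (· + 1)).map (· + 1) by
            simp [List.map_map, Function.comp_def],
        pvChop_prepend_head (rs.length + 1) b (r :: rs) ((pvI rs).map (· + 1)), ih r]
      have e2 := pvGl_append [b] [r] rs
      simp only [pvGl, h, Bool.false_eq_true, ite_false]
      simpa using e2.symm

theorem pvZS_cast (xs : List (String × String)) (ss : List Nat) :
    pvZS (xs.length : Int) xs (ss.map (Nat.cast : Nat → Int)) = pvChop xs.length xs ss := by
  induction ss with
  | nil => rfl
  | cons s ss ih =>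
    cases ss with
    | nil =>
      show [PySem.List.slice xs (some (s : Int)) (some (xs.length : Int))]
          = [(xs.drop s).take (xs.length - s)]
      rw [PySem.List.slice_natCast]
    | cons s' ss' =>
      show PySem.List.slice xs (some (s : Int)) (some (s' : Int))
            :: pvZS (xs.length : Int) xs (List.map (Nat.cast : Nat → Int) (s' :: ss'))
          = (xs.drop s).take (s' - s) :: pvChop xs.length xs (s' :: ss')
      rw [PySem.List.slice_natCast, ih]

theorem map_range_pairs (n : Int) (blocks : List (String × String)) (ts : List Int) (hts : ts ≠ []) :
    (List.range ts.length).map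
      (fun j => PySem.List.slice blocks (some (ts.getD j 0))
        (some (if (j : Int) + 1 < (ts.length : Int) then ts.getD (j + 1) 0 else n))) =
    pvZS n blocks ts := by
  induction ts with
  | nil => exact absurd rfl hts
  | cons s ss ih =>
    cases ss with
    | nil =>
      simp only [pvZS]
      rw [List.length_singleton, List.range_one, List.map_cons, List.map_nil]
      rw [if_neg (by simp)]
      rfl
    | cons s' ss' =>
      have hmap : ∀ j : ℕ,
          PySem.List.slice blocks (some ((s :: s' :: ss').getD (j + 1) 0))
            (some (if ((j + 1 : ℕ) : Int) + 1 < ((s :: s' :: ss').length : Int)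
              then (s :: s' :: ss').getD (j + 1 + 1) 0 else n))
          = PySem.List.slice blocks (some ((s' :: ss').getD j 0))
            (some (if (j : Int) + 1 < ((s' :: ss').length : Int)
              then (s' :: ss').getD (j + 1) 0 else n)) := by
        intro j
        have hc : (((j + 1 : ℕ) : Int) + 1 < ((s :: s' :: ss').length : Int))
            ↔ ((j : Int) + 1 < ((s' :: ss').length : Int)) := by
          simp only [List.length_cons]; push_cast; omega
        simp only [List.getD_cons_succ]
        by_cases h : (j : Int) + 1 < ((s' :: ss').length : Int)
        · rw [if_pos (hc.mpr h), if_pos h]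
        · rw [if_neg (fun hh => h (hc.mp hh)), if_neg h]
      rw [show (s :: s' :: ss').length = (s' :: ss').length + 1 from rfl,
        List.range_succ_eq_map, List.map_cons, List.map_map]
      simp only [pvZS]
      refine congrArg₂ _ ?_ ?_
      · rw [if_pos (by simp only [List.length_cons]; push_cast; omega)]
        rfl
      · rw [← ih (by simp)]
        apply List.map_congr_left
        intro j _
        exact hmap j

theorem body_eq (b : String × String) (rest : List (String × String)) :
    (fun (acc : List Int) (i : Int) =>
      let blk := PySem.List.pyGetD (b :: rest) i ("", "")
      let t := PySem.Str.lower (PySem.Str.strip blk.2)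
      if t == "" then acc
      else if aScanPhrases t pvPhrases then acc ++ [i] else acc)
    = (fun (acc : List Int) (i : Int) =>
        if bBoundary (PySem.List.pyGetD (b :: rest) i ("", "")) then acc ++ [i] else acc) := by
  funext acc i
  simp only [bBoundary, aScanPhrases_eq_any]
  by_cases h1 : PySem.Str.lower (PySem.Str.strip (PySem.List.pyGetD (b :: rest) i ("", "")).2) = ""
  · simp [h1]
  · by_cases h2 : pvPhrases.any
        (fun p => pvMatch (PySem.Str.lower (PySem.Str.strip (PySem.List.pyGetD (b :: rest) i ("", "")).2)) p) <;>
      simp [h1, h2]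

def pvStartsN (rest : List (String × String)) : List Nat :=
  0 :: (pvI rest).map (· + 1)

theorem starts_eq (b : String × String) (rest : List (String × String)) :
    (PySem.List.pyRange 1 (((b :: rest : List (String × String)).length : Nat) : Int) 1).foldl
      (fun (acc : List Int) (i : Int) =>
        let blk := PySem.List.pyGetD (b :: rest) i ("", "")
        let t := PySem.Str.lower (PySem.Str.strip blk.2)
        if t == "" then acc
        else if aScanPhrases t pvPhrases then acc ++ [i] else acc)
      [(0 : Int)]
    = List.map (Nat.cast : Nat → Int) (pvStartsN rest) := by
  rw [body_eq, PySem.List.foldl_append_if, PySem.List.pyRange_one]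
  have hlen : ((((b :: rest : List (String × String)).length : Nat) : Int) - 1).toNat
      = rest.length := by simp
  rw [hlen, List.filter_map]
  have hfc : List.filter
        ((fun i => bBoundary (PySem.List.pyGetD (b :: rest) i ("", ""))) ∘ fun k : Nat => (1 : Int) + ↑k)
        (List.range rest.length)
      = List.filter (fun k : Nat => bBoundary (rest.getD k ("", ""))) (List.range rest.length) := by
    apply List.filter_congr
    intro k _
    simp only [Function.comp_apply]
    rw [show (1 : Int) + (k : Int) = ((k + 1 : Nat) : Int) by push_cast; ring,
      PySem.List.pyGetD_natCast, List.getD_cons_succ]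
  rw [hfc]
  simp only [pvStartsN, pvI, List.map_cons, List.map_map, List.singleton_append, Nat.cast_zero]
  refine congrArg (List.cons _) (List.map_congr_left ?_)
  intro k _
  simp only [Function.comp_apply]
  push_cast
  ring

theorem aEq (b : String × String) (rest : List (String × String)) :
    split_into_document_segments_py (b :: rest) = pvGl [b] rest := by
  have hne : (b :: rest : List (String × String)) ≠ [] := by simp
  simp only [split_into_document_segments_py, if_neg hne]
  rw [starts_eq b rest]
  rw [PySem.List.foldl_append_singleton_eq_map]
  rw [List.nil_append, List.length_map, PySem.List.pyRange_zero_nat, List.map_map]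
  have hperj : ∀ j : Nat,
      ((fun j : Int =>
          PySem.List.slice (b :: rest)
            (some (PySem.List.pyGetD (List.map (Nat.cast : Nat → Int) (pvStartsN rest)) j 0))
            (some (if j + 1 < (((pvStartsN rest)).length : Int)
              then PySem.List.pyGetD (List.map (Nat.cast : Nat → Int) (pvStartsN rest)) (j + 1) 0
              else (((b :: rest : List (String × String)).length : Nat) : Int))))
        ∘ (fun k : Nat => (k : Int))) j
      = PySem.List.slice (b :: rest)
          (some ((List.map (Nat.cast : Nat → Int) (pvStartsN rest)).getD j 0))
          (some (if (j : Int) + 1 < (((pvStartsN rest)).length : Int)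
            then (List.map (Nat.cast : Nat → Int) (pvStartsN rest)).getD (j + 1) 0
            else (((b :: rest : List (String × String)).length : Nat) : Int))) := by
    intro j
    simp only [Function.comp_apply, PySem.List.pyGetD_natCast]
    congr 1
    congr 1
    by_cases hc : (j : Int) + 1 < (((pvStartsN rest)).length : Int)
    · rw [if_pos hc, if_pos hc,
        show ((j : Nat) : Int) + 1 = (((j + 1 : Nat)) : Int) by push_cast; ring,
        PySem.List.pyGetD_natCast]
    · rw [if_neg hc, if_neg hc]
  have hlen2 : (pvStartsN rest).length
      = (List.map (Nat.cast : Nat → Int) (pvStartsN rest)).length := by simp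
  rw [List.map_congr_left (fun j _ => hperj j), hlen2,
    map_range_pairs _ _ _ (by simp [pvStartsN]), pvZS_cast]
  simp only [pvStartsN]
  rw [show (b :: rest : List (String × String)).length = rest.length + 1 from rfl,
    pvChop_eq_pvGl]

theorem bEq (b : String × String) (rest : List (String × String)) :
    split_into_document_segments_py_alt (b :: rest) = pvGl [b] rest := by
  simp only [split_into_document_segments_py_alt]
  have := fold_eq_pvGl rest [] [b]
  simpa using this

-- ===== VERDICT (by name: the statement is the Claim_ definition above) =====
theorem split_into_document_segments_py_spec : Claim_equal_split_into_document_segments_py := by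
  intro blocks _
  unfold Spec_split_into_document_segments_py
  cases blocks with
  | nil => rfl
  | cons b rest => rw [aEq, bEq]
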